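-- pv_equiv track=rewrite | github.com/bassil/advent_of_code | 2023/02/sol.py | part_2
-- ===== SOURCE A (Python) =====
-- import math
--
-- def part_2(games):
--     result = 0
--     for game in games.values():
--         min_num_cubes_of_color = {"red": 0, "green": 0, "blue": 0}
--         for subgame in game:
--             for color, num_cubes in subgame.items():
--                 if min_num_cubes_of_color[color] < num_cubes:
--                     min_num_cubes_of_color[color] = num_cubes
--         result += math.prod(min_num_cubes_of_color.values())
--     return result
-- ===== SOURCE B (Python) =====
-- SLOTS = {"red": 0, "green": 1, "blue": 2}
--
-- def part_2(games):
--     # Encode each count's color as a slot index while flattening the game into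
--     # one list of (slot, count) pairs (unknown colors raise KeyError, as in the
--     # original), then take three separate per-slot passes: max of each slot's
--     # counts (floored at 0) multiplied together.  No running dict of maxima.
--     total = 0
--     for game in games.values():
--         flat = [(SLOTS[c], n) for sub in game for c, n in sub.items()]
--         power = 1
--         for s in (0, 1, 2):
--             power *= max([0] + [n for i, n in flat if i == s])
--         total += power
--     return total
-- ===== Notes on version B (the rewrite author's own statement) =====
-- stated objective: alternative
-- what changed: B flattens each game into one list of (slot,count) pairs with colors encoded as slot indices, then runs three separate per-slot passes taking each slot's max and multiplying, instead of A's single interleaved pass maintaining a dict of running per-color maxima.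
import Mathlib
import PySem

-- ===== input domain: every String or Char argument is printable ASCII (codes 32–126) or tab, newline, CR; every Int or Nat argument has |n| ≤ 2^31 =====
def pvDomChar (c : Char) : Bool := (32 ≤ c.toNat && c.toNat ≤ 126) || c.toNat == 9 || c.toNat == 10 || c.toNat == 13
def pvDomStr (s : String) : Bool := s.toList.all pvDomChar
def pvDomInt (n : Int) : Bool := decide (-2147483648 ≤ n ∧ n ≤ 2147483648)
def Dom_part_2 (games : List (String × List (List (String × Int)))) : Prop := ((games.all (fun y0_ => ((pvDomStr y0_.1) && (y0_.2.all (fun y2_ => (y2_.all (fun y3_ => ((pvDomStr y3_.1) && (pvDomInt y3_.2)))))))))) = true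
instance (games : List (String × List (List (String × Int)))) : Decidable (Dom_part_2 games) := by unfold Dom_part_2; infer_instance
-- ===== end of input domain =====

-- B flattens each game into (slot, count) pairs — colors encoded as slot
-- indices via a fixed dict — and then takes three separate per-slot max passes
-- and multiplies, instead of A's single interleaved pass with a dict of
-- running per-color maxima (objective: alternative).


-- ===== PORT A =====
-- one item step: `if min_num_cubes_of_color[color] < num_cubes: …[color] = num_cubes`
-- (the `none` branch of get? is Python's KeyError; excluded by Pre_part_2)
def stepA (d : PySem.Dict String Int) (cn : String × Int) : PySem.Dict String Int :=
  match d.get? cn.1 with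
  | none => d
  | some cur => if cur < cn.2 then d.insert cn.1 cn.2 else d

-- the body of A's game loop: fill the dict of running maxima, then
-- `math.prod(min_num_cubes_of_color.values())`
def powerA (game : List (List (String × Int))) : Int :=
  let d := game.foldl (fun d subgame => subgame.foldl stepA d)
    (PySem.Dict.mk [("red", 0), ("green", 0), ("blue", 0)])
  d.values.foldl (· * ·) 1

def part_2 (games : List (String × List (List (String × Int)))) : Int :=
  games.foldl (fun result game => result + powerA game.2) 0

-- ===== PORT B =====
-- `SLOTS = {"red": 0, "green": 1, "blue": 2}`
def pvSlots : PySem.Dict String Int := PySem.Dict.mk [("red", 0), ("green", 1), ("blue", 2)]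

-- `flat = [(SLOTS[c], n) for sub in game for c, n in sub.items()]`
-- (the `none` branch of get? is Python's KeyError; excluded by Pre_part_2)
def flatB (game : List (List (String × Int))) : List (Int × Int) :=
  game.flatMap (fun sub => sub.filterMap (fun cn =>
    match pvSlots.get? cn.1 with
    | some s => some (s, cn.2)
    | none => none))

-- `max([0] + …)`
def maxOf (l : List Int) : Int :=
  match PySem.List.max? l (fun y => y) with
  | some m => m
  | none => 0      -- unreachable: the list starts with 0

-- `for s in (0, 1, 2): power *= max([0] + [n for i, n in flat if i == s])`
def powerB (game : List (List (String × Int))) : Int :=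
  let flat := flatB game
  [(0 : Int), 1, 2].foldl (fun power s =>
    power * maxOf (0 :: flat.filterMap (fun x => if x.1 = s then some x.2 else none))) 1

def part_2_alt (games : List (String × List (List (String × Int)))) : Int :=
  games.foldl (fun total game => total + powerB game.2) 0

-- ===== PRECONDITION & SPEC =====
-- Pre_ excludes exactly the inputs where A (and B) raise KeyError: a color key
-- other than "red"/"green"/"blue" somewhere in the games.
def Pre_part_2 (games : List (String × List (List (String × Int)))) : Prop :=
  ∀ game ∈ games, ∀ subgame ∈ game.2, ∀ cn ∈ subgame,
    cn.1 = "red" ∨ cn.1 = "green" ∨ cn.1 = "blue"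
instance (games : List (String × List (List (String × Int)))) : Decidable (Pre_part_2 games) := by unfold Pre_part_2; infer_instance
def pvWitness_part_2 : (List (String × List (List (String × Int)))) :=
  [("Game 1", [[("red", 1), ("green", 2)], [("blue", 3)]])]

def Spec_part_2 (games : List (String × List (List (String × Int)))) (out : Int) : Prop := out = part_2_alt games
instance (games : List (String × List (List (String × Int)))) (out : Int) : Decidable (Spec_part_2 games out) := by unfold Spec_part_2; infer_instance

-- ===== CLAIM (what is proved, stated in full; the proofs are below) =====
def Claim_equal_part_2 : Prop := ∀ (games : List (String × List (List (String × Int)))), Dom_part_2 games → Pre_part_2 games → Spec_part_2 games (part_2 games)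

-- ===== LEMMAS AND PROOFS =====

-- the values a color takes in one subgame, in order
def occf (color : String) (sub : List (String × Int)) : List Int :=
  sub.filterMap (fun cn => if cn.1 = color then some cn.2 else none)

-- A's running-max step
def max2 (m n : Int) : Int := if m < n then n else m

lemma stepA_red (r g b n : Int) :
    stepA (PySem.Dict.mk [("red", r), ("green", g), ("blue", b)]) ("red", n) =
      PySem.Dict.mk [("red", max2 r n), ("green", g), ("blue", b)] := by
  by_cases h : r < n <;>
    simp [stepA, max2, PySem.Dict.get?, PySem.Dict.insert, PySem.Dict.contains, h]

lemma stepA_green (r g b n : Int) :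
    stepA (PySem.Dict.mk [("red", r), ("green", g), ("blue", b)]) ("green", n) =
      PySem.Dict.mk [("red", r), ("green", max2 g n), ("blue", b)] := by
  by_cases h : g < n <;>
    simp [stepA, max2, PySem.Dict.get?, PySem.Dict.insert, PySem.Dict.contains, h]

lemma stepA_blue (r g b n : Int) :
    stepA (PySem.Dict.mk [("red", r), ("green", g), ("blue", b)]) ("blue", n) =
      PySem.Dict.mk [("red", r), ("green", g), ("blue", max2 b n)] := by
  by_cases h : b < n <;>
    simp [stepA, max2, PySem.Dict.get?, PySem.Dict.insert, PySem.Dict.contains, h]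

-- A's item loop over one subgame folds max2 over each color's occurrences
lemma innerA (sub : List (String × Int))
    (h : ∀ cn ∈ sub, cn.1 = "red" ∨ cn.1 = "green" ∨ cn.1 = "blue")
    (r g b : Int) :
    sub.foldl stepA (PySem.Dict.mk [("red", r), ("green", g), ("blue", b)]) =
      PySem.Dict.mk [("red", (occf "red" sub).foldl max2 r),
                     ("green", (occf "green" sub).foldl max2 g),
                     ("blue", (occf "blue" sub).foldl max2 b)] := by
  induction sub generalizing r g b with
  | nil => rfl
  | cons cn t ih =>
    have hcn := h cn (List.mem_cons_self ..)
    have ht : ∀ x ∈ t, x.1 = "red" ∨ x.1 = "green" ∨ x.1 = "blue" :=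
      fun x hx => h x (List.mem_cons_of_mem _ hx)
    obtain ⟨c, n⟩ := cn
    rcases hcn with hc | hc | hc <;> subst hc
    · rw [List.foldl_cons, stepA_red, ih ht]; simp [occf]
    · rw [List.foldl_cons, stepA_green, ih ht]; simp [occf]
    · rw [List.foldl_cons, stepA_blue, ih ht]; simp [occf]

lemma outerA (subs : List (List (String × Int)))
    (h : ∀ sub ∈ subs, ∀ cn ∈ sub, cn.1 = "red" ∨ cn.1 = "green" ∨ cn.1 = "blue")
    (r g b : Int) :
    subs.foldl (fun d sub => sub.foldl stepA d)
        (PySem.Dict.mk [("red", r), ("green", g), ("blue", b)]) =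
      PySem.Dict.mk [("red", (subs.flatMap (occf "red")).foldl max2 r),
                     ("green", (subs.flatMap (occf "green")).foldl max2 g),
                     ("blue", (subs.flatMap (occf "blue")).foldl max2 b)] := by
  induction subs generalizing r g b with
  | nil => rfl
  | cons sub t ih =>
    rw [List.foldl_cons, innerA sub (h sub (List.mem_cons_self ..)),
        ih (fun s hs => h s (List.mem_cons_of_mem _ hs))]
    simp [List.foldl_append]

lemma max2_eq_max (m n : Int) : max2 m n = max m n := by
  unfold max2; split <;> omega

lemma foldl_max2_eq (l : List Int) (m : Int) : l.foldl max2 m = l.foldl max m := by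
  induction l generalizing m with
  | nil => rfl
  | cons x t ih => rw [List.foldl_cons, List.foldl_cons, max2_eq_max, ih]

-- B's max over 0 :: occ is A's running max from 0
lemma maxOf_zero_cons (occ : List Int) : maxOf (0 :: occ) = occ.foldl max2 0 := by
  rw [foldl_max2_eq]
  simp [maxOf, PySem.List.max?_id_cons]

-- on a valid game, B's per-slot selection of the flattened pairs is exactly
-- that slot's color's occurrences in order
lemma flat_slot (game : List (List (String × Int)))
    (h : ∀ sub ∈ game, ∀ cn ∈ sub, cn.1 = "red" ∨ cn.1 = "green" ∨ cn.1 = "blue")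
    (s : Int) (color : String)
    (hs : (s = 0 ∧ color = "red") ∨ (s = 1 ∧ color = "green") ∨ (s = 2 ∧ color = "blue")) :
    (flatB game).filterMap (fun x => if x.1 = s then some x.2 else none) =
      game.flatMap (occf color) := by
  induction game with
  | nil => rfl
  | cons sub t ih =>
    have ht : ∀ x ∈ t, ∀ cn ∈ x, cn.1 = "red" ∨ cn.1 = "green" ∨ cn.1 = "blue" :=
      fun x hx => h x (List.mem_cons_of_mem _ hx)
    have hsub := h sub (List.mem_cons_self ..)
    simp only [flatB, List.flatMap_cons, List.filterMap_append] at *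
    rw [ih ht]
    congr 1
    rw [List.filterMap_filterMap]
    apply List.filterMap_congr
    intro cn hcn
    rcases hsub cn hcn with hc | hc | hc <;>
      rcases hs with ⟨hs1, hs2⟩ | ⟨hs1, hs2⟩ | ⟨hs1, hs2⟩ <;>
        subst hs1 <;> subst hs2 <;>
          simp [occf, hc, pvSlots, PySem.Dict.get?]
  
-- the two per-game bodies agree
lemma power_eq (game : List (List (String × Int)))
    (h : ∀ sub ∈ game, ∀ cn ∈ sub, cn.1 = "red" ∨ cn.1 = "green" ∨ cn.1 = "blue") :
    powerA game = powerB game := by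
  unfold powerA powerB
  rw [outerA game h]
  simp only [List.foldl_cons, List.foldl_nil,
    flat_slot game h 0 "red" (Or.inl ⟨rfl, rfl⟩),
    flat_slot game h 1 "green" (Or.inr (Or.inl ⟨rfl, rfl⟩)),
    flat_slot game h 2 "blue" (Or.inr (Or.inr ⟨rfl, rfl⟩)),
    maxOf_zero_cons]
  simp [PySem.Dict.values]

lemma fold_games (games : List (String × List (List (String × Int))))
    (hpre : Pre_part_2 games) (acc : Int) :
    games.foldl (fun result game => result + powerA game.2) acc =
    games.foldl (fun total game => total + powerB game.2) acc := by
  induction games generalizing acc with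
  | nil => rfl
  | cons game t ih =>
    simp only [List.foldl_cons]
    rw [power_eq game.2 (hpre game (List.mem_cons_self ..))]
    exact ih (fun x hx => hpre x (List.mem_cons_of_mem _ hx)) _

-- ===== VERDICT (by name: the statement is the Claim_ definition above) =====
theorem part_2_spec : Claim_equal_part_2 := by
  intro games _ hpre
  unfold Spec_part_2 part_2 part_2_alt
  exact fold_games games hpre 0
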